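-- pv_equiv track=rewrite | github.com/Pascale61G/Chi-square_decryption | ChiSquare_Caesar.py | shift_dict
-- ===== SOURCE A (Python) =====
-- def shift_dict(dic, shift):
--     dic_len = len(dic)
--     shift = shift % dic_len
--     list_dic = [(k,v) for k, v in dic.items()]
--     shifted = {
--         list_dic[x][0]: list_dic[ (x - shift) % dic_len ][1]
--         for x in range(dic_len)
--     }
--     return shifted
-- ===== SOURCE B (Python) =====
-- def shift_dict(dic, shift):
--     shift = shift % len(dic)
--     values = list(dic.values())
--     for _ in range(shift):
--         values = [values[-1]] + values[:-1]
--     return dict(zip(dic, values))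
-- ===== Notes on version B (the rewrite author's own statement) =====
-- stated objective: alternative
-- what changed: Replaces the dict comprehension that indexes each position with (x-shift)%n by a loop performing shift%n single-step rotations of the values list, zipped back onto the keys.
import Mathlib
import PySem

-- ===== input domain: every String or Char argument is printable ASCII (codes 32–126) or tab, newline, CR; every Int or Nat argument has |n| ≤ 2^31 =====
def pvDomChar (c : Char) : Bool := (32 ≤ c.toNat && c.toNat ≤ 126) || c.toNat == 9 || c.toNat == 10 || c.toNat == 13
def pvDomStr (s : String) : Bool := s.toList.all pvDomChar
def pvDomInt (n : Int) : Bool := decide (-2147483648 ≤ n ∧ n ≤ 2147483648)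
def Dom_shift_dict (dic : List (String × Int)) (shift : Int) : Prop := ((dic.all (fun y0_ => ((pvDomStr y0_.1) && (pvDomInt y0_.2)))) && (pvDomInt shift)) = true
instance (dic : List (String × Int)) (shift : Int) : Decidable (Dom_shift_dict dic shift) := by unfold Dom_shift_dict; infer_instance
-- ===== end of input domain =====

-- B replaces the per-index (x-shift)%n dict comprehension by shift%n repeated one-step
-- rotations of the values list zipped back onto the keys (alternative decomposition, not faster).

-- ===== PORT A =====
def shift_dict (dic : List (String × Int)) (shift : Int) : List (String × Int) :=
  let dicLen : Int := (dic.length : Int)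
  let shift2 := PySem.Int.mod shift dicLen
  let listDic := dic.map (fun kv => (kv.1, kv.2))
  ((PySem.List.pyRange 0 dicLen 1).foldl
    (fun d x =>
      d.insert (PySem.List.pyGetD listDic x ("", 0)).1
               (PySem.List.pyGetD listDic (PySem.Int.mod (x - shift2) dicLen) ("", 0)).2)
    PySem.Dict.empty).items

-- ===== PORT B =====
-- one step of the loop body: values = [values[-1]] + values[:-1]
-- (values is nonempty whenever the loop runs — shift % n ≥ 1 forces n ≥ 1 — so the
--  pyGetD default is never used)
def rot1 (v : List Int) : List Int :=
  [PySem.List.pyGetD v (-1) 0] ++ PySem.List.slice v none (some (-1))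

def shift_dict_alt (dic : List (String × Int)) (shift : Int) : List (String × Int) :=
  let s := PySem.Int.mod shift (dic.length : Int)
  let values := (PySem.List.pyRange 0 s 1).foldl (fun v _ => rot1 v) (dic.map Prod.snd)
  (PySem.Dict.ofList ((dic.map Prod.fst).zip values)).items

-- ===== PRECONDITION & SPEC =====
-- Python A raises ZeroDivisionError on the empty dict (shift % 0); B raises there too.
def Pre_shift_dict (dic : List (String × Int)) (shift : Int) : Prop := dic ≠ []
instance (dic : List (String × Int)) (shift : Int) : Decidable (Pre_shift_dict dic shift) := by unfold Pre_shift_dict; infer_instance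
def pvWitness_shift_dict : (List (String × Int)) × Int := ([("a", 1), ("b", 2), ("c", 3)], 1)

def Spec_shift_dict (dic : List (String × Int)) (shift : Int) (out : List (String × Int)) : Prop := out = shift_dict_alt dic shift
instance (dic : List (String × Int)) (shift : Int) (out : List (String × Int)) : Decidable (Spec_shift_dict dic shift out) := by unfold Spec_shift_dict; infer_instance

-- ===== CLAIM (what is proved, stated in full; the proofs are below) =====
def Claim_equal_shift_dict : Prop := ∀ (dic : List (String × Int)) (shift : Int), Dom_shift_dict dic shift → Pre_shift_dict dic shift → Spec_shift_dict dic shift (shift_dict dic shift)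

-- ===== LEMMAS AND PROOFS =====

-- Dict.update (hence ofList) is the fold of insert over the pair list.
lemma dict_update_eq_foldl {κ ν : Type} [BEq κ] (l : List (κ × ν)) (d : PySem.Dict κ ν) :
    d.update l = l.foldl (fun d p => d.insert p.1 p.2) d := by
  induction l generalizing d with
  | nil => simp [PySem.Dict.update]
  | cons p t ih => simp [PySem.Dict.update] at *

-- a fold whose body ignores the list element is an iterate of its body
lemma foldl_const_iterate {α β : Type} (g : α → α) (l : List β) (v : α) :
    l.foldl (fun v _ => g v) v = g^[l.length] v := by
  induction l generalizing v with
  | nil => simp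
  | cons b t ih => simp [List.foldl_cons, ih, Function.iterate_succ_apply]

-- one Python rotation step is List.rotate by length - 1
lemma rot1_eq_rotate (w : List Int) (hw : w ≠ []) :
    rot1 w = w.rotate (w.length - 1) := by
  rw [List.rotate_eq_drop_append_take (by omega)]
  unfold rot1
  rw [PySem.List.pyGetD_neg_one (h := hw), PySem.List.slice_to_neg_one]
  rw [List.dropLast_eq_take, List.drop_length_sub_one hw]

-- ((n-1)*s) % n = (n-s) % n for s < n
lemma mul_pred_mod (n s : Nat) (hn : 0 < n) (hs : s < n) :
    ((n - 1) * s) % n = (n - s) % n := by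
  rcases Nat.eq_zero_or_pos s with h0 | hpos
  · subst h0; simp
  · obtain ⟨a, rfl⟩ : ∃ a, s = a + 1 := ⟨s - 1, by omega⟩
    have h : (n - 1) * (a + 1) = n * a + (n - (a + 1)) := by
      zify [show 1 ≤ n by omega, show a + 1 ≤ n by omega]; ring
    rw [h, Nat.mul_add_mod]

-- iterating rot1 k times is List.rotate by (n-1)*k
lemma iterate_rot1 (v : List Int) (hv : 0 < v.length) (k : Nat) :
    rot1^[k] v = v.rotate (((v.length - 1) * k) % v.length) := by
  induction k with
  | zero => simp [Nat.mod_eq_of_lt hv]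
  | succ k ih =>
      rw [Function.iterate_succ_apply', ih,
          rot1_eq_rotate _ (by simp [← List.length_pos_iff, hv]),
          List.length_rotate, List.rotate_rotate, ← List.rotate_mod,
          Nat.mod_add_mod]
      congr 1

-- B's fold of one-step rotations, as the drop/take split used on the A side
lemma foldl_rot1 (v : List Int) (s : Int)
    (hs0 : 0 ≤ s) (hs1 : s < (v.length : Int)) :
    (PySem.List.pyRange 0 s 1).foldl (fun v _ => rot1 v) v =
      v.drop ((v.length - s.toNat) % v.length) ++
      v.take ((v.length - s.toNat) % v.length) := by
  have hn : 0 < v.length := by exact_mod_cast lt_of_le_of_lt hs0 hs1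
  have hsl : s.toNat < v.length := by omega
  rw [foldl_const_iterate, PySem.List.length_pyRange_one, sub_zero,
      iterate_rot1 v hn, mul_pred_mod _ _ hn hsl,
      List.rotate_eq_drop_append_take (Nat.le_of_lt (Nat.mod_lt _ hn))]

-- the rotation index (k - s) mod n, matched against the drop/take split point m
lemma modIdx (n m k : Nat) (s : Int) (hs0 : 0 ≤ s) (hs1 : s < (n:Int))
    (hm : m = (n - s.toNat) % n) (hkn : k < n) :
    ((k : Int) - s) % (n : Int) = (((if k < n - m then m + k else k - (n - m)) : Nat) : Int) := by
  rcases Nat.eq_zero_or_pos s.toNat with h0 | hpos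
  · have hm0 : m = 0 := by rw [hm, h0, Nat.sub_zero, Nat.mod_self]
    have hs : s = 0 := by omega
    subst hs hm0
    simp only [sub_zero, Nat.sub_zero, Nat.add_comm]
    rw [Int.emod_eq_of_lt (by omega) (by exact_mod_cast hkn), if_pos hkn]
    simp
  · have hms : m = n - s.toNat := by rw [hm]; exact Nat.mod_eq_of_lt (by omega)
    by_cases h : k < n - m
    · have h1 : (k : Int) - s = ((m + k : Nat) : Int) - (n : Int) := by push_cast; omega
      rw [h1, Int.sub_emod_right, Int.emod_eq_of_lt (by omega) (by push_cast; omega)]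
      simp [h]
    · have h1 : (k : Int) - s = ((k - (n - m) : Nat) : Int) := by omega
      rw [h1, Int.emod_eq_of_lt (by omega) (by omega)]
      simp [h]

theorem shift_dict_eq (dic : List (String × Int)) (shift : Int) (hne : dic ≠ []) :
    shift_dict dic shift = shift_dict_alt dic shift := by
  have hn : 0 < dic.length := List.length_pos_iff.mpr hne
  unfold shift_dict shift_dict_alt
  simp only []
  set n := dic.length with hnn
  set s := PySem.Int.mod shift (n : Int) with hsdef
  have hs0 : 0 ≤ s := PySem.Int.mod_nonneg shift (by exact_mod_cast hn)
  have hs1 : s < (n : Int) := PySem.Int.mod_lt shift (by exact_mod_cast hn)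
  set m := (n - s.toNat) % n with hm
  have hmn : m < n := Nat.mod_lt _ hn
  -- turn A's fold into Dict.ofList of the mapped pair list
  rw [show (dic.map (fun kv => (kv.1, kv.2))) = dic by simp]
  rw [show ((PySem.List.pyRange 0 (n : Int) 1).foldl
      (fun d x =>
        d.insert (PySem.List.pyGetD dic x ("", 0)).1
                 (PySem.List.pyGetD dic (PySem.Int.mod (x - s) (n : Int)) ("", 0)).2)
      PySem.Dict.empty)
      = PySem.Dict.ofList ((PySem.List.pyRange 0 (n : Int) 1).map
          (fun x => ((PySem.List.pyGetD dic x ("", 0)).1,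
                     (PySem.List.pyGetD dic (PySem.Int.mod (x - s) (n : Int)) ("", 0)).2)))
      from by
        rw [PySem.Dict.ofList, dict_update_eq_foldl, List.foldl_map]]
  congr 2
  rw [foldl_rot1 (dic.map Prod.snd) s hs0 (by simpa using hs1)]
  simp only [List.length_map, ← hnn, ← hm]
  apply List.ext_getElem
  · simp [PySem.List.pyRange_one]
    omega
  · intro k hk1 hk2
    simp only [PySem.List.pyRange_one, List.map_map, List.length_map,
      List.length_range] at hk1 ⊢
    have hkn : k < n := by simpa using hk1
    rw [List.getElem_map, List.getElem_range, List.getElem_zip]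
    simp only [Function.comp, zero_add]
    -- the two indices into dic
    have hidx1 : PySem.List.pyGetD dic ((k : Int)) ("", 0) = dic[k] := by
      rw [PySem.List.pyGetD_natCast]
      exact List.getD_eq_getElem _ _ hkn
    have hmod : PySem.Int.mod ((k : Int) - s) (n : Int) =
        (((if k < n - m then m + k else k - (n - m)) : Nat) : Int) := by
      rw [PySem.Int.mod_eq_emod_of_pos (by exact_mod_cast hn)]
      exact modIdx n m k s hs0 hs1 hm hkn
    have hidx2 : PySem.List.pyGetD dic (PySem.Int.mod ((k : Int) - s) (n : Int)) ("", 0)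
        = dic[(if k < n - m then m + k else k - (n - m))]'(by split_ifs <;> omega) := by
      rw [hmod, PySem.List.pyGetD_natCast]
      exact List.getD_eq_getElem _ _ (by split_ifs <;> omega)
    rw [hidx1, hidx2, Prod.mk.injEq]
    constructor
    · simp
    · by_cases h : k < n - m
      · rw [List.getElem_append_left (by simp; omega), List.getElem_drop]
        simp [h]
      · rw [List.getElem_append_right (by simp; omega)]
        simp only [List.getElem_take, List.getElem_map, List.length_drop, List.length_map]
        simp [← hnn, h]

-- ===== VERDICT (by name: the statement is the Claim_ definition above) =====
theorem shift_dict_spec : Claim_equal_shift_dict := by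
  intro dic shift _ hpre
  exact shift_dict_eq dic shift hpre
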